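-- pv_equiv track=rewrite | github.com/enfasis/AoC | 2018/8.py | parse
-- ===== SOURCE A (Python) =====
-- def parse(data):
--     children, entries, *data = data
--     totals = 0
--     values = []
--
--     for _ in range(children):
--         total, value, data = parse(data)
--         totals += total
--         values.append(value)
--
--     totals += sum(data[:entries])
--
--     if children:
--         return (
--             totals,
--             sum(values[i - 1] for i in data[:entries] if i > 0 and i <= len(values)),
--             data[entries:],
--         )
--     return totals, sum(data[:entries]), data[entries:]
-- ===== SOURCE B (Python) =====
-- def parse(data):
--     # Iterative explicit-stack parser: consume the header, then loop with a stack of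
--     # frames (children, entries, child_values, metadata_total), slicing metadata off
--     # the front of the remaining list when a frame's children are done.
--     c, e, data = data[0], data[1], data[2:]
--     stack = [(c, e, [], 0)]
--     while True:
--         c, e, values, total = stack[-1]
--         if len(values) < c:
--             stack.append((data[0], data[1], [], 0))
--             data = data[2:]
--             continue
--         stack.pop()
--         meta, data = data[:e], data[e:]
--         total += sum(meta)
--         if c:
--             value = sum(values[m - 1] for m in meta if 0 < m <= len(values))
--         else:
--             value = sum(meta)
--         if stack:
--             pc, pe, pv, pt = stack.pop()
--             stack.append((pc, pe, pv + [value], pt + total))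
--         else:
--             return total, value, data
-- ===== Notes on version B (the rewrite author's own statement) =====
-- stated objective: alternative
-- what changed: Replaced the recursive-descent parser with an iterative explicit-stack parser that threads the remaining list through a loop of frames and folds each finished node's metadata total and value into its parent frame.
import Mathlib
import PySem

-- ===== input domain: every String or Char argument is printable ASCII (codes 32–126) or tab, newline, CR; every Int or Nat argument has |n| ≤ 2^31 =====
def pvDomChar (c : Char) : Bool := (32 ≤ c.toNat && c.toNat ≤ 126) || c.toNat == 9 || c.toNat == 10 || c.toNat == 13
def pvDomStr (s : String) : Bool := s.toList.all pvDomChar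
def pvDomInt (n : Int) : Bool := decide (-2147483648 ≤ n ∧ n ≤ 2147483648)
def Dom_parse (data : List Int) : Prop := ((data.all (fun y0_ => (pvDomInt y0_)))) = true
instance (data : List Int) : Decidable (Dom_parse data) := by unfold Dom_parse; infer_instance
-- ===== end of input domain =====

-- B replaces A's recursion by an explicit-stack loop that threads the remaining list;
-- the return value is proved equal wherever A returns.

-- ===== PORT A =====
-- fuel only guards termination (data.length + 1 always suffices where the Python returns)
def loopWith (p : List Int → Option (Int × Int × List Int)) :
    Nat → Int → List Int → List Int → Option (Int × List Int × List Int)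
  | 0, totals, values, d => some (totals, values, d)
  | n + 1, totals, values, d =>
    match p d with
    | none => none
    | some (t, v, d') => loopWith p n (totals + t) (values ++ [v]) d'

def parseF : Nat → List Int → Option (Int × Int × List Int)
  | 0, _ => none
  | f + 1, children :: entries :: rest =>
    match loopWith (parseF f) children.toNat 0 [] rest with
    | none => none
    | some (totals, values, d) =>
      let md := PySem.List.slice d none (some entries)
      let totals := totals + md.sum
      if children ≠ 0 then
        some (totals,
          md.foldl (fun s i =>
            if 0 < i ∧ i ≤ (values.length : Int) then s + PySem.List.pyGetD values (i - 1) 0 else s) 0,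
          PySem.List.slice d (some entries) none)
      else
        some (totals, md.sum, PySem.List.slice d (some entries) none)
  | _ + 1, _ => none   -- 'children, entries, *data = data' raises ValueError on fewer than 2 elements

def parse (data : List Int) : Int × Int × List Int :=
  (parseF (data.length + 1) data).getD (0, 0, [])

-- ===== PORT B =====
-- frame = (children, entries, child_values, metadata_total); fuel only guards termination
def stepB : Nat → List Int → List (Int × Int × List Int × Int) → Option (Int × Int × List Int)
  | 0, _, _ => none
  | _ + 1, _, [] => none
  | f + 1, data, (c, e, values, total) :: rest =>
    if (values.length : Int) < c then
      match PySem.List.pyGet? data 0, PySem.List.pyGet? data 1 with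
      | some a, some b =>
          stepB f (PySem.List.slice data (some 2) none)
            ((a, b, ([] : List Int), (0 : Int)) :: (c, e, values, total) :: rest)
      | _, _ => none
    else
      let md := PySem.List.slice data none (some e)
      let data' := PySem.List.slice data (some e) none
      let total := total + md.sum
      let value := if c ≠ 0 then
          md.foldl (fun s m =>
            if 0 < m ∧ m ≤ (values.length : Int) then s + PySem.List.pyGetD values (m - 1) 0 else s) 0
        else md.sum
      match rest with
      | (pc, pe, pv, pt) :: rest' => stepB f data' ((pc, pe, pv ++ [value], pt + total) :: rest')
      | [] => some (total, value, data')

def parse_alt (data : List Int) : Int × Int × List Int :=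
  match PySem.List.pyGet? data 0, PySem.List.pyGet? data 1 with
  | some a, some b =>
      (stepB (data.length + 1) (PySem.List.slice data (some 2) none) [(a, b, [], 0)]).getD (0, 0, [])
  | _, _ => (0, 0, [])

-- ===== PRECONDITION & SPEC =====
-- grammar check: the input must start with a complete tree encoding (a stack of
-- (children still expected, entries) obligations can be discharged); exactly where
-- A returns instead of raising ValueError on a short header
def chk : Nat → List Int → List (Nat × Int) → Bool
  | _, _, [] => true
  | 0, _, _ :: _ => false
  | f + 1, d, (0, e) :: st => chk f (PySem.List.slice d (some e) none) st
  | f + 1, a :: b :: d, (n + 1, e) :: st => chk f d ((a.toNat, b) :: (n, e) :: st)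
  | _ + 1, _, (_ + 1, _) :: _ => false

-- data.length + 2 steps always suffice: every step either consumes input or pops the stack
def Pre_parse (data : List Int) : Prop := chk (data.length + 2) data [(1, 0)] = true
instance (data : List Int) : Decidable (Pre_parse data) := by unfold Pre_parse; infer_instance

def pvWitness_parse : List Int := [2, 3, 0, 3, 10, 11, 12, 1, 1, 0, 1, 99, 2, 1, 1, 2]

def Spec_parse (data : List Int) (out : Int × Int × List Int) : Prop := out = parse_alt data
instance (data : List Int) (out : Int × Int × List Int) : Decidable (Spec_parse data out) := by unfold Spec_parse; infer_instance

-- ===== CLAIM (what is proved, stated in full; the proofs are below) =====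
def Claim_equal_parse : Prop := ∀ (data : List Int), Dom_parse data → Pre_parse data → Spec_parse data (parse data)

-- ===== LEMMAS AND PROOFS =====

-- abbreviations for the per-node computations shared by both ports
def metaOf (d : List Int) (e : Int) : List Int := PySem.List.slice d none (some e)
def remOf (d : List Int) (e : Int) : List Int := PySem.List.slice d (some e) none
def valOf (values md : List Int) : Int :=
  md.foldl (fun s m =>
    if 0 < m ∧ m ≤ (values.length : Int) then s + PySem.List.pyGetD values (m - 1) 0 else s) 0

lemma remOf_neg (d : List Int) (e : Int) (he : e < 0) :
    remOf d e = d.drop (d.length - (-e).toNat) := by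
  obtain ⟨k, hk, rfl⟩ : ∃ k : Nat, 0 < k ∧ e = -(k : Int) := ⟨(-e).toNat, by omega, by omega⟩
  rw [remOf, PySem.List.slice_from_neg_natCast d k hk]
  congr 2
  omega

lemma remOf_length_le (d : List Int) (e : Int) : (remOf d e).length ≤ d.length := by
  by_cases he : 0 ≤ e
  · rw [remOf, PySem.List.slice_from _ he]; simp
  · rw [remOf_neg d e (by omega)]; simp

lemma header_eq (d : List Int) (a b : Int)
    (ha : PySem.List.pyGet? d 0 = some a) (hb : PySem.List.pyGet? d 1 = some b) :
    d = a :: b :: PySem.List.slice d (some 2) none := by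
  rw [PySem.List.slice_from d (by norm_num), show ((2 : Int).toNat) = 2 from rfl]
  match d with
  | [] => simp [PySem.List.pyGet?] at ha
  | [x] =>
    rw [show (1 : Int) = ((1 : Nat) : Int) from rfl, PySem.List.pyGet?_natCast] at hb
    simp at hb
  | x :: y :: t =>
    rw [PySem.List.pyGet?_zero_cons] at ha
    rw [show (1 : Int) = ((1 : Nat) : Int) from rfl, PySem.List.pyGet?_natCast] at hb
    simp only [List.getElem?_cons_succ, List.getElem?_cons_zero, Option.some.injEq] at hb
    injection ha with ha
    simp [ha, hb]

lemma header_get (d : List Int) (a b : Int) (t : List Int) (h : d = a :: b :: t) :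
    PySem.List.pyGet? d 0 = some a ∧ PySem.List.pyGet? d 1 = some b ∧
      PySem.List.slice d (some 2) none = t := by
  subst h
  refine ⟨PySem.List.pyGet?_zero_cons a _, ?_, ?_⟩
  · rw [show (1 : Int) = ((1 : Nat) : Int) from rfl, PySem.List.pyGet?_natCast]; rfl
  · rw [PySem.List.slice_from _ (by norm_num)]; rfl

-- fuel monotonicity of A's port
lemma loopWith_mono (p q : List Int → Option (Int × Int × List Int))
    (hpq : ∀ d r, p d = some r → q d = some r) :
    ∀ (n : Nat) (t : Int) (vs d : List Int) (r : Int × List Int × List Int),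
      loopWith p n t vs d = some r → loopWith q n t vs d = some r := by
  intro n
  induction n with
  | zero => intro t vs d r h; simpa [loopWith] using h
  | succ n ih =>
    intro t vs d r h
    simp only [loopWith] at h ⊢
    rcases hp : p d with _ | ⟨⟨t1, v1, d1⟩⟩
    · rw [hp] at h; exact absurd h (by simp)
    · rw [hp] at h; rw [hpq _ _ hp]; exact ih _ _ _ _ h

lemma parseF_mono : ∀ (f f' : Nat), f ≤ f' → ∀ (d : List Int) (r : Int × Int × List Int),
    parseF f d = some r → parseF f' d = some r := by
  intro f
  induction f with
  | zero => intro f' _ d r h; exact absurd h (by simp [parseF])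
  | succ f ih =>
    intro f' hle d r h
    obtain ⟨f'', rfl⟩ : ∃ g, f' = g + 1 := ⟨f' - 1, by omega⟩
    match d with
    | [] => exact absurd h (by simp [parseF])
    | [x] => exact absurd h (by simp [parseF])
    | c :: e :: rest =>
      simp only [parseF] at h ⊢
      rcases hl : loopWith (parseF f) c.toNat 0 [] rest with _ | ⟨⟨T, VS, d'⟩⟩
      · rw [hl] at h; exact absurd h (by simp)
      · rw [hl] at h
        rw [loopWith_mono (parseF f) (parseF f'') (fun d r => ih f'' (by omega) d r) _ _ _ _ _ hl]
        exact h

-- machine simulation: every successful run of B's machine on a top frame is a run of A's loop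
lemma sim : ∀ (f : Nat) (d : List Int) (c e : Int) (values : List Int) (total : Int)
    (st : List (Int × Int × List Int × Int)) (res : Int × Int × List Int),
    stepB f d ((c, e, values, total) :: st) = some res →
    ∃ (fa : Nat) (T : Int) (VS d' : List Int),
      fa < f ∧
      loopWith (parseF fa) (c - (values.length : Int)).toNat total values d = some (T, VS, d') ∧
      (match st with
       | [] => res = (T + (metaOf d' e).sum,
           if c ≠ 0 then valOf VS (metaOf d' e) else (metaOf d' e).sum,
           remOf d' e)
       | (pc, pe, pv, pt) :: st' => ∃ f', f' < f ∧
           stepB f' (remOf d' e)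
             ((pc, pe,
               pv ++ [if c ≠ 0 then valOf VS (metaOf d' e) else (metaOf d' e).sum],
               pt + (T + (metaOf d' e).sum)) :: st') = some res) := by
  intro f
  induction f using Nat.strong_induction_on with
  | _ f IH =>
  intro d c e values total st res hstep
  match f with
  | 0 => exact absurd hstep (by simp [stepB])
  | f + 1 =>
    simp only [stepB] at hstep
    by_cases hlt : (values.length : Int) < c
    · -- push: read a child's header
      rw [if_pos hlt] at hstep
      rcases hga : PySem.List.pyGet? d 0 with _ | a'
      · rw [hga] at hstep; cases hstep
      rcases hgb : PySem.List.pyGet? d 1 with _ | b'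
      · rw [hga, hgb] at hstep; cases hstep
      rw [hga, hgb] at hstep
      obtain ⟨fc, Tc, VSc, dc, hfc, hloopc, hmc⟩ :=
        IH f (by omega) _ a' b' [] 0 ((c, e, values, total) :: st) res hstep
      simp only at hmc
      obtain ⟨f', hf', hstep'⟩ := hmc
      obtain ⟨fp, T, VS, d', hfp, hloopp, hmp⟩ :=
        IH f' (by omega) (remOf dc b') c e
          (values ++ [if a' ≠ 0 then valOf VSc (metaOf dc b') else (metaOf dc b').sum])
          (total + (Tc + (metaOf dc b').sum)) st res hstep'
      refine ⟨max (fc + 1) fp, T, VS, d', by omega, ?_, ?_⟩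
      · rw [header_eq d a' b' hga hgb]
        rw [show (c - ((values.length : Nat) : Int)).toNat
            = (c - (((values ++ [if a' ≠ 0 then valOf VSc (metaOf dc b')
                else (metaOf dc b').sum]).length : Nat) : Int)).toNat + 1 by
          simp only [List.length_append, List.length_cons, List.length_nil]
          push_cast
          omega]
        simp only [loopWith]
        have hz : (a' - ((([] : List Int).length : Nat) : Int)).toNat = a'.toNat := by simp
        rw [hz] at hloopc
        have hPc : parseF (fc + 1) (a' :: b' :: PySem.List.slice d (some 2) none)
            = some (Tc + (metaOf dc b').sum,
                if a' ≠ 0 then valOf VSc (metaOf dc b') else (metaOf dc b').sum,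
                remOf dc b') := by
          simp only [parseF]
          rw [hloopc]
          simp only [metaOf, remOf, valOf]
          split_ifs <;> rfl
        rw [parseF_mono _ _ (le_max_left (fc + 1) fp) _ _ hPc]
        exact loopWith_mono _ _
          (fun d r h => parseF_mono fp _ (le_max_right (fc + 1) fp) d r h) _ _ _ _ _ hloopp
      · match st, hmp with
        | [], hmp => exact hmp
        | (pc, pe, pv, pt) :: st', hmp =>
          obtain ⟨f'', hf'', h⟩ := hmp
          exact ⟨f'', by omega, h⟩
    · -- pop: the frame is complete
      rw [if_neg hlt] at hstep
      refine ⟨0, total, values, d, by omega, ?_, ?_⟩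
      · rw [show (c - ((values.length : Nat) : Int)).toNat = 0 by omega]
        simp [loopWith]
      · match st, hstep with
        | [], hstep =>
          simp only at hstep
          simp only [metaOf, remOf, valOf]
          exact (Option.some.injEq _ _ ▸ hstep).symm
        | (pc, pe, pv, pt) :: st', hstep =>
          simp only at hstep
          simp only [metaOf, remOf, valOf]
          exact ⟨f, by omega, hstep⟩

-- frame erasure: what the grammar checker sees of a machine stack
def eraseTop (fr : Int × Int × List Int × Int) : Nat × Int :=
  ((fr.1 - (fr.2.2.1.length : Int)).toNat, fr.2.1)
def eraseRest (fr : Int × Int × List Int × Int) : Nat × Int :=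
  ((fr.1 - (fr.2.2.1.length : Int) - 1).toNat, fr.2.1)
def eraseStack : List (Int × Int × List Int × Int) → List (Nat × Int)
  | [] => []
  | fr :: fs => eraseTop fr :: fs.map eraseRest

lemma chk_cons_cons (f : Nat) (a b : Int) (d : List Int) (n : Nat) (e : Int)
    (st : List (Nat × Int)) :
    chk (f + 1) (a :: b :: d) ((n + 1, e) :: st) = chk f d ((a.toNat, b) :: (n, e) :: st) := rfl

lemma chk_pop (f : Nat) (d : List Int) (e : Int) (st : List (Nat × Int)) :
    chk (f + 1) d ((0, e) :: st) = chk f (PySem.List.slice d (some e) none) st := rfl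

-- the grammar checker guarantees the machine returns
lemma runB : ∀ (f : Nat) (d : List Int) (st : List (Int × Int × List Int × Int))
    (ex : List (Nat × Int)),
    st ≠ [] →
    (∃ g, chk g d (eraseStack st ++ ex) = true) →
    d.length + st.length < f →
    (stepB f d st).isSome := by
  intro f
  induction f with
  | zero =>
    intro d st ex hne hchk hm
    have h1 : 1 ≤ st.length := List.length_pos_of_ne_nil hne
    omega
  | succ f IH =>
    intro d st ex hne hchk hm
    match st with
    | [] => exact absurd rfl hne
    | (c, e, values, total) :: rest =>
      obtain ⟨g, hchk⟩ := hchk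
      match g with
      | 0 => exact absurd hchk (by simp [eraseStack, chk])
      | g + 1 =>
        simp only [stepB]
        by_cases hlt : (values.length : Int) < c
        · rw [if_pos hlt]
          obtain ⟨n, hn⟩ : ∃ n, (c - ((values.length : Nat) : Int)).toNat = n + 1 :=
            ⟨(c - values.length - 1).toNat, by omega⟩
          simp only [eraseStack, eraseTop, List.cons_append] at hchk
          rw [hn] at hchk
          match hd : d with
          | [] => simp [chk] at hchk
          | [x] => simp [chk] at hchk
          | a :: b :: d2 =>
            obtain ⟨hga, hgb, hd2⟩ := header_get (a :: b :: d2) a b d2 rfl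
            rw [hga, hgb, hd2]
            apply IH d2 ((a, b, [], 0) :: (c, e, values, total) :: rest) ex (by simp)
            · refine ⟨g, ?_⟩
              rw [chk_cons_cons] at hchk
              simp only [eraseStack, eraseTop, eraseRest, List.map_cons, List.cons_append]
              have hn' : n = (c - ((values.length : Nat) : Int) - 1).toNat := by omega
              have hz : ((a - ((([] : List Int).length : Nat) : Int)).toNat, b) = (a.toNat, b) := by
                simp
              rw [hz, ← hn']
              exact hchk
            · simp only [List.length_cons]
              simp only [List.length_cons] at hm
              omega
        · rw [if_neg hlt]
          -- the checker pops this frame: its counter is 0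
          simp only [eraseStack, eraseTop, List.cons_append] at hchk
          rw [show (c - ((values.length : Nat) : Int)).toNat = 0 by omega] at hchk
          rw [chk_pop] at hchk
          have hrl : (PySem.List.slice d (some e) none).length ≤ d.length :=
            remOf_length_le d e
          match rest with
          | [] => simp
          | (pc, pe, pv, pt) :: rest' =>
            simp only
            apply IH (PySem.List.slice d (some e) none)
              ((pc, pe,
                pv ++ [if c ≠ 0 then
                    (PySem.List.slice d none (some e)).foldl (fun s m =>
                      if 0 < m ∧ m ≤ (values.length : Int) then
                        s + PySem.List.pyGetD values (m - 1) 0 else s) 0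
                  else (PySem.List.slice d none (some e)).sum],
                pt + (total + (PySem.List.slice d none (some e)).sum)) :: rest')
              ex (by simp)
            · refine ⟨g, ?_⟩
              simp only [eraseStack, eraseTop, eraseRest, List.map_cons, List.cons_append,
                List.length_append, List.length_cons, List.length_nil] at hchk ⊢
              have hz : ((pc - (((pv.length + 0 + 1 : Nat)) : Int)).toNat, pe)
                  = ((pc - ((pv.length : Nat) : Int) - 1).toNat, pe) := by
                push_cast
                congr 1
                omega
              rw [hz]
              exact hchk
            · simp only [List.length_cons] at hm ⊢
              omega

-- ===== VERDICT (by name: the statement is the Claim_ definition above) =====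
theorem parse_spec : Claim_equal_parse := by
  intro data0 _ hPre
  unfold Spec_parse
  match data0 with
  | [] => exact absurd hPre (by simp [Pre_parse, chk])
  | [x] => exact absurd hPre (by simp [Pre_parse, chk])
  | a :: b :: rest =>
    have hPre' : chk (rest.length + 3) rest [(a.toNat, b), (0, 0)] = true := hPre
    obtain ⟨hga, hgb, hd2⟩ := header_get (a :: b :: rest) a b rest rfl
    have hrun : (stepB ((a :: b :: rest).length + 1)
        (PySem.List.slice (a :: b :: rest) (some 2) none) [(a, b, [], 0)]).isSome := by
      rw [hd2]
      apply runB _ _ _ [(0, 0)] (by simp)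
      · exact ⟨rest.length + 3, by simpa [eraseStack, eraseTop] using hPre'⟩
      · simp
    obtain ⟨res, hres⟩ := Option.isSome_iff_exists.mp hrun
    rw [hd2] at hres
    obtain ⟨fa, T, VS, d', hfa, hloop, hmatch⟩ := sim _ _ a b [] 0 [] res hres
    simp only at hmatch
    have hz : (a - ((([] : List Int).length : Nat) : Int)).toNat = a.toNat := by simp
    rw [hz] at hloop
    have hA : parseF (fa + 1) (a :: b :: rest) = some res := by
      simp only [parseF]
      rw [hloop, hmatch]
      simp only [metaOf, remOf, valOf]
      split_ifs <;> rfl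
    have hA' := parseF_mono _ ((a :: b :: rest).length + 1) (by omega) _ _ hA
    show parse _ = parse_alt _
    rw [parse, hA']
    rw [parse_alt, hga, hgb, hd2]
    simp only [hres, Option.getD_some]
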